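-- pv_equiv track=rewrite | github.com/onerain92/algorithm | Baekjoon/트로피 진열.py | solution
-- ===== SOURCE A (Python) =====
-- def solution(trophys):
--     left = 1
--     right = 1
--
--     for i in range(1, len(trophys)):
--         if trophys[i] - trophys[i - 1] > 0:
--             left += 1
--         else:
--             right += 1
--
--     return left, right
-- ===== SOURCE B (Python) =====
-- def solution(trophys):
--     def inc(lo, hi):
--         # number of increasing adjacent pairs inside trophys[lo:hi]
--         if hi - lo < 2:
--             return 0
--         mid = (lo + hi) // 2
--         bridge = 1 if trophys[mid] - trophys[mid - 1] > 0 else 0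
--         return inc(lo, mid) + inc(mid, hi) + bridge
--     c = inc(0, len(trophys))
--     return c + 1, max(0, len(trophys) - 1) - c + 1
-- ===== Notes on version B (the rewrite author's own statement) =====
-- stated objective: alternative
-- what changed: Replaces A's left-to-right twin-accumulator loop with a divide-and-conquer recursion that counts increasing adjacent pairs in the two halves plus the bridging pair (correct because adjacent pairs split exactly at the midpoint), deriving the non-increasing component by arithmetic complement.
import Mathlib
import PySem

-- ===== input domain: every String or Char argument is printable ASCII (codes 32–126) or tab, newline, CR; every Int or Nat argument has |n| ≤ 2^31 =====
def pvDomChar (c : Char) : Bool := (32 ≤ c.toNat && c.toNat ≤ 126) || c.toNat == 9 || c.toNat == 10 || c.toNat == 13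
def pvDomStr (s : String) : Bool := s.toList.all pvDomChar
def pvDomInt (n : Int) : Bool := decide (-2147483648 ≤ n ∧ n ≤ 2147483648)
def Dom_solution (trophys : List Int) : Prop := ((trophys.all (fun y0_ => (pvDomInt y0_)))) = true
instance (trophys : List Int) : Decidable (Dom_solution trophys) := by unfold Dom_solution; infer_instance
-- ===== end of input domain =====

-- B replaces A's twin-accumulator loop by a divide-and-conquer count of increasing
-- adjacent pairs plus an arithmetic complement (objective: alternative, same cost).

-- ===== PORT A =====
-- loop over range(1, len(trophys)) carrying (left, right); indices are always in range, so pyGetD is exact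
def solution (trophys : List Int) : Int × Int :=
  (PySem.List.pyRange 1 (trophys.length : Int) 1).foldl
    (fun (st : Int × Int) i =>
      if PySem.List.pyGetD trophys i 0 - PySem.List.pyGetD trophys (i - 1) 0 > 0
      then (st.1 + 1, st.2)
      else (st.1, st.2 + 1))
    (1, 1)

-- ===== PORT B =====
-- inc(lo, hi): divide-and-conquer count of increasing adjacent pairs in trophys[lo:hi];
-- indices mid, mid-1 are always in range at the call sites, so pyGetD is exact
def incDC (t : List Int) (lo hi : Int) : Int :=
  if hi - lo < 2 then 0
  else
    incDC t lo (PySem.Int.floordiv (lo + hi) 2) + incDC t (PySem.Int.floordiv (lo + hi) 2) hi +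
      (if PySem.List.pyGetD t (PySem.Int.floordiv (lo + hi) 2) 0
            - PySem.List.pyGetD t (PySem.Int.floordiv (lo + hi) 2 - 1) 0 > 0 then 1 else 0)
termination_by (hi - lo).toNat
decreasing_by
  · have hm : lo + 1 ≤ PySem.Int.floordiv (lo + hi) 2 ∧ PySem.Int.floordiv (lo + hi) 2 ≤ hi - 1 := by
      rw [PySem.Int.floordiv_eq_ediv_of_pos (by omega)]; omega
    omega
  · have hm : lo + 1 ≤ PySem.Int.floordiv (lo + hi) 2 ∧ PySem.Int.floordiv (lo + hi) 2 ≤ hi - 1 := by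
      rw [PySem.Int.floordiv_eq_ediv_of_pos (by omega)]; omega
    omega

def solution_alt (trophys : List Int) : Int × Int :=
  let c := incDC trophys 0 (trophys.length : Int)
  (c + 1, max 0 ((trophys.length : Int) - 1) - c + 1)

-- ===== PRECONDITION & SPEC =====
def Spec_solution (trophys : List Int) (out : Int × Int) : Prop := out = solution_alt trophys
instance (trophys : List Int) (out : Int × Int) : Decidable (Spec_solution trophys out) := by unfold Spec_solution; infer_instance

-- ===== CLAIM =====
def Claim_equal_solution : Prop := ∀ (trophys : List Int), Dom_solution trophys → Spec_solution trophys (solution trophys)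

-- ===== LEMMAS AND PROOFS =====

-- A's loop shape: the twin accumulators count p-hits and misses.
theorem foldl_twin_count (p : Int → Prop) [DecidablePred p] (xs : List Int) (a b : Int) :
    xs.foldl (fun (st : Int × Int) i => if p i then (st.1 + 1, st.2) else (st.1, st.2 + 1)) (a, b)
      = (a + (xs.countP (fun i => decide (p i)) : Nat),
         b + ((xs.length : Int) - (xs.countP (fun i => decide (p i)) : Nat))) := by
  induction xs generalizing a b with
  | nil => simp
  | cons x t ih =>
    by_cases h : p x <;>
      simp [List.foldl_cons, h, ih, Prod.ext_iff] <;> omega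

-- B's recursion counts exactly the increasing indices in range(lo+1, hi).
theorem incDC_eq_countP (t : List Int) (lo hi : Int) :
    incDC t lo hi
      = (((PySem.List.pyRange (lo + 1) hi 1).countP
            (fun i => decide (PySem.List.pyGetD t i 0 - PySem.List.pyGetD t (i - 1) 0 > 0)) : Nat) : Int) := by
  fun_induction incDC t lo hi with
  | case1 lo hi h =>
    rw [PySem.List.pyRange_one_eq_nil (by omega)]
    simp
  | case2 lo hi h ih1 ih2 =>
    have hm : lo + 1 ≤ PySem.Int.floordiv (lo + hi) 2 ∧ PySem.Int.floordiv (lo + hi) 2 ≤ hi - 1 := by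
      rw [PySem.Int.floordiv_eq_ediv_of_pos (by omega)]; omega
    set mid := PySem.Int.floordiv (lo + hi) 2 with hmid
    rw [PySem.List.pyRange_one_append (lo + 1) mid hi (by omega) (by omega),
        PySem.List.pyRange_one_cons (a := mid) (by omega)]
    rw [List.countP_append, List.countP_cons]
    rw [ih1, ih2]
    simp only [decide_eq_true_eq]
    split_ifs with hb <;> (push_cast; ring)

-- ===== VERDICT =====
theorem solution_spec : Claim_equal_solution := by
  intro l _
  unfold Spec_solution solution solution_alt
  rw [foldl_twin_count (fun i => PySem.List.pyGetD l i 0 - PySem.List.pyGetD l (i - 1) 0 > 0)]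
  rw [incDC_eq_countP]
  have hl : ((PySem.List.pyRange 1 (l.length : Int) 1).length : Int)
      = max 0 ((l.length : Int) - 1) := by
    rw [PySem.List.length_pyRange_one]; omega
  rw [hl]
  norm_num [Prod.ext_iff]
  constructor <;> ring
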